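-- pv_equiv track=rewrite | github.com/oliverwu/cn-python-foundation | investigate texts and calls/EN/Task4.py | find_possible_telemarketers
-- ===== SOURCE A (Python) =====
-- def outgoing_call_telenum_pool(calls):
--     outgoing_call_telenum_pool = []
--     for call in calls:
--         if call[0] not in outgoing_call_telenum_pool:
--             outgoing_call_telenum_pool.append(call[0])
--     return set(outgoing_call_telenum_pool)
--
-- def find_possible_telemarketers(calls,texts):
--     telenum_pool = outgoing_call_telenum_pool(calls)
--     for call in calls:
--         if call[1] in telenum_pool:
--             telenum_pool.remove(call[1])
--     for text in texts:
--         if text[0] in telenum_pool: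
--             telenum_pool.remove(text[0])
--         if text[1] in telenum_pool:
--             telenum_pool.remove(text[1])
--     return '\n'.join(sorted(telenum_pool))
-- ===== SOURCE B (Python) =====
-- def find_possible_telemarketers(calls, texts):
--     # One status dict: number -> True if ever seen as a call receiver or text
--     # participant (excluded), False if seen only as a caller so far.
--     status = {}
--     for call in calls:
--         status.setdefault(call[0], False)
--         status[call[1]] = True
--     for text in texts:
--         status[text[0]] = True
--         status[text[1]] = True
--     return '\n'.join(sorted(num for num, excluded in status.items() if not excluded))
-- ===== Notes on version B (the rewrite author's own statement) =====
-- stated objective: alternative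
-- what changed: Replaces A's dedup-list build plus three mutate-and-remove loops over a pool with a single status dictionary (number -> excluded flag) filled in one pass per list via setdefault/overwrite, then filters its items for un-excluded numbers.
import Mathlib
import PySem

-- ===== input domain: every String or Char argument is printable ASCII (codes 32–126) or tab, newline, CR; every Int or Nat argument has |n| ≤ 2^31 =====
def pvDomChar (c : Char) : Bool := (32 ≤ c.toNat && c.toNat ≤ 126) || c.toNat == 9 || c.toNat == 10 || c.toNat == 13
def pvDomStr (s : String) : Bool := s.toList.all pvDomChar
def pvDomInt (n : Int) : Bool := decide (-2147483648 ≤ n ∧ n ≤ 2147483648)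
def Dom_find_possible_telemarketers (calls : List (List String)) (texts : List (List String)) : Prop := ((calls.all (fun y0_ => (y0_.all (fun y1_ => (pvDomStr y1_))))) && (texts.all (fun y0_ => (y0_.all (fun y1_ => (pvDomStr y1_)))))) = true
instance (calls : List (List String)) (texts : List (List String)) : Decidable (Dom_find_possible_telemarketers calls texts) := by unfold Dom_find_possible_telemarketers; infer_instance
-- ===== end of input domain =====

-- B replaces A's dedup-list build and three mutate-and-remove loops with one
-- status dictionary (number -> excluded flag) filled in one pass per list and
-- then filtered (objective: alternative decomposition).

-- ===== PORT A =====
-- helper: dedup list of callers, then set(); pyGetD is exact under Pre_ (rows have length ≥ 2)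
def outgoing_call_telenum_pool (calls : List (List String)) : PySem.Set String :=
  PySem.Set.ofList (calls.foldl (fun acc call =>
    if PySem.List.pyGetD call 0 "" ∈ acc then acc else acc ++ [PySem.List.pyGetD call 0 ""]) [])

def find_possible_telemarketers (calls : List (List String)) (texts : List (List String)) : String :=
  let pool0 := outgoing_call_telenum_pool calls
  let pool1 := calls.foldl (fun s call =>
      if PySem.Set.contains s (PySem.List.pyGetD call 1 "")
      then PySem.Set.discard s (PySem.List.pyGetD call 1 "") else s) pool0
  let pool2 := texts.foldl (fun s text =>
      let s1 := if PySem.Set.contains s (PySem.List.pyGetD text 0 "")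
                then PySem.Set.discard s (PySem.List.pyGetD text 0 "") else s
      if PySem.Set.contains s1 (PySem.List.pyGetD text 1 "")
      then PySem.Set.discard s1 (PySem.List.pyGetD text 1 "") else s1) pool1
  PySem.Str.join "\n" (PySem.List.sorted pool2 (fun x => x) false)

-- ===== PORT B =====
def find_possible_telemarketers_alt (calls : List (List String)) (texts : List (List String)) : String :=
  let d1 := calls.foldl (fun d call =>
      (PySem.Dict.setdefault d (PySem.List.pyGetD call 0 "") false).insert
        (PySem.List.pyGetD call 1 "") true) PySem.Dict.empty
  let d2 := texts.foldl (fun d text =>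
      (d.insert (PySem.List.pyGetD text 0 "") true).insert
        (PySem.List.pyGetD text 1 "") true) d1
  PySem.Str.join "\n" (PySem.List.sorted
    ((d2.items.filter (fun p => !p.2)).map (fun p => p.1)) (fun x => x) false)

-- ===== PRECONDITION & SPEC =====
-- Pre_: every row of calls and texts has length ≥ 2; on shorter rows Python A raises IndexError.
def Pre_find_possible_telemarketers (calls : List (List String)) (texts : List (List String)) : Prop :=
  (∀ c ∈ calls, 2 ≤ c.length) ∧ (∀ t ∈ texts, 2 ≤ t.length)
instance (calls : List (List String)) (texts : List (List String)) : Decidable (Pre_find_possible_telemarketers calls texts) := by unfold Pre_find_possible_telemarketers; infer_instance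

def pvWitness_find_possible_telemarketers : List (List String) × List (List String) :=
  ([["1", "2"], ["3", "1"]], [["4", "5"]])

def Spec_find_possible_telemarketers (calls : List (List String)) (texts : List (List String)) (out : String) : Prop := out = find_possible_telemarketers_alt calls texts
instance (calls : List (List String)) (texts : List (List String)) (out : String) : Decidable (Spec_find_possible_telemarketers calls texts out) := by unfold Spec_find_possible_telemarketers; infer_instance

-- ===== CLAIM (what is proved, stated in full; the proofs are below) =====
def Claim_equal_find_possible_telemarketers : Prop := ∀ (calls : List (List String)) (texts : List (List String)), Dom_find_possible_telemarketers calls texts → Pre_find_possible_telemarketers calls texts → Spec_find_possible_telemarketers calls texts (find_possible_telemarketers calls texts)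

-- ===== LEMMAS AND PROOFS =====

-- A-side: guarded discard removes exactly one element
theorem mem_guardDiscard (s : PySem.Set String) (y x : String) :
    x ∈ (if PySem.Set.contains s y then PySem.Set.discard s y else s) ↔ x ∈ s ∧ x ≠ y := by
  split_ifs with h
  · exact PySem.Set.mem_discard (s := s) (x := y) (y := x)
  · have hy : y ∉ s := by
      intro hm
      exact h ((PySem.Set.contains_iff s y).mpr hm)
    constructor
    · intro hx; exact ⟨hx, fun e => hy (e ▸ hx)⟩
    · rintro ⟨hx, -⟩; exact hx

theorem nodup_guardDiscard (s : PySem.Set String) (y : String) (h : s.Nodup) :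
    ((if PySem.Set.contains s y then PySem.Set.discard s y else s) : List String).Nodup := by
  split_ifs
  · exact PySem.Set.nodup_discard (s := s) (x := y) h
  · exact h

theorem mem_foldl_guard1 (f : List String → String) (l : List (List String))
    (s : PySem.Set String) (x : String) :
    x ∈ l.foldl (fun s c => if PySem.Set.contains s (f c) then PySem.Set.discard s (f c) else s) s
      ↔ x ∈ s ∧ ∀ c ∈ l, x ≠ f c := by
  induction l generalizing s with
  | nil => simp
  | cons hd tl ih =>
    simp only [List.foldl_cons, ih, mem_guardDiscard, List.mem_cons]
    constructor
    · rintro ⟨⟨hs, hne⟩, hall⟩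
      exact ⟨hs, by rintro c (rfl | hc); exact hne; exact hall c hc⟩
    · rintro ⟨hs, hall⟩
      exact ⟨⟨hs, hall hd (Or.inl rfl)⟩, fun c hc => hall c (Or.inr hc)⟩

theorem nodup_foldl_guard1 (f : List String → String) (l : List (List String))
    (s : PySem.Set String) (h : s.Nodup) :
    (l.foldl (fun s c => if PySem.Set.contains s (f c) then PySem.Set.discard s (f c) else s) s).Nodup := by
  induction l generalizing s with
  | nil => exact h
  | cons hd tl ih => exact ih _ (nodup_guardDiscard _ _ h)

theorem mem_foldl_guard2 (f g : List String → String) (l : List (List String))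
    (s : PySem.Set String) (x : String) :
    x ∈ l.foldl (fun s t =>
        let s1 := if PySem.Set.contains s (f t) then PySem.Set.discard s (f t) else s
        if PySem.Set.contains s1 (g t) then PySem.Set.discard s1 (g t) else s1) s
      ↔ x ∈ s ∧ ∀ t ∈ l, x ≠ f t ∧ x ≠ g t := by
  induction l generalizing s with
  | nil => simp
  | cons hd tl ih =>
    simp only [List.foldl_cons, ih, mem_guardDiscard, List.mem_cons]
    constructor
    · rintro ⟨⟨⟨hs, hf⟩, hg⟩, hall⟩
      exact ⟨hs, by rintro t (rfl | ht); exact ⟨hf, hg⟩; exact hall t ht⟩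
    · rintro ⟨hs, hall⟩
      exact ⟨⟨⟨hs, (hall hd (Or.inl rfl)).1⟩, (hall hd (Or.inl rfl)).2⟩,
        fun t ht => hall t (Or.inr ht)⟩

theorem nodup_foldl_guard2 (f g : List String → String) (l : List (List String))
    (s : PySem.Set String) (h : s.Nodup) :
    (l.foldl (fun s t =>
        let s1 := if PySem.Set.contains s (f t) then PySem.Set.discard s (f t) else s
        if PySem.Set.contains s1 (g t) then PySem.Set.discard s1 (g t) else s1) s).Nodup := by
  induction l generalizing s with
  | nil => exact h
  | cons hd tl ih => exact ih _ (nodup_guardDiscard _ _ (nodup_guardDiscard _ _ h))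

-- A's dedup-by-membership loop is exactly building set(calls.map first)
theorem pool0_eq (calls : List (List String)) :
    outgoing_call_telenum_pool calls
      = PySem.Set.ofList (calls.map (fun c => PySem.List.pyGetD c 0 "")) := by
  unfold outgoing_call_telenum_pool
  have h1 : (calls.foldl (fun acc call =>
      if PySem.List.pyGetD call 0 "" ∈ acc then acc else acc ++ [PySem.List.pyGetD call 0 ""]) [])
      = calls.foldl (fun acc call => PySem.Set.add acc (PySem.List.pyGetD call 0 "")) [] := by
    apply PySem.List.foldl_congr_mem
    intro acc c hc
    rw [PySem.Set.add_eq_ite]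
  rw [h1, ← PySem.Set.update_map_eq_foldl_add, PySem.Set.update_nil_left,
    PySem.Set.ofList_ofList]

-- B-side: lookup after the calls loop (setdefault caller False; receiver := True)
theorem get?_calls_fold (f g : List String → String) (l : List (List String))
    (d : PySem.Dict String Bool) (x : String) :
    (l.foldl (fun d c => (PySem.Dict.setdefault d (f c) false).insert (g c) true) d).get? x
      = if x ∈ l.map g then some true
        else (d.get? x).or (if x ∈ l.map f then some false else none) := by
  induction l generalizing d with
  | nil => simp
  | cons hd tl ih =>
    simp only [List.foldl_cons, ih, List.map_cons, List.mem_cons]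
    have hset : (PySem.Dict.setdefault d (f hd) false).get? x
        = (d.get? x).or (if x = f hd then some false else none) := by
      by_cases hxf : x = f hd
      · rw [hxf, PySem.Dict.get?_setdefault_self]
        cases d.get? (f hd) <;> simp
      · by_cases hc : d.contains (f hd) = true
        · rw [PySem.Dict.setdefault_of_contains d false hc]; simp [hxf]
        · rw [PySem.Dict.setdefault_of_not_contains d false (by simpa using hc),
            PySem.Dict.get?_insert]
          simp [hxf]
    rw [PySem.Dict.get?_insert, hset]
    clear ih hset
    cases hdx : d.get? x <;> split_ifs <;> simp_all <;> tauto

-- B-side: lookup after the texts loop (both participants := True)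
theorem get?_texts_fold (f g : List String → String) (l : List (List String))
    (d : PySem.Dict String Bool) (x : String) :
    (l.foldl (fun d t => (d.insert (f t) true).insert (g t) true) d).get? x
      = if x ∈ l.map f ∨ x ∈ l.map g then some true else d.get? x := by
  induction l generalizing d with
  | nil => simp
  | cons hd tl ih =>
    simp only [List.foldl_cons, ih, List.map_cons, List.mem_cons]
    rw [PySem.Dict.get?_insert, PySem.Dict.get?_insert]
    clear ih
    split_ifs <;> simp_all <;> tauto

-- keys stay unique through B's two loops
theorem nodup_keys_calls_fold (f g : List String → String) (l : List (List String))
    (d : PySem.Dict String Bool) (h : d.keys.Nodup) :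
    (l.foldl (fun d c => (PySem.Dict.setdefault d (f c) false).insert (g c) true) d).keys.Nodup := by
  induction l generalizing d with
  | nil => exact h
  | cons hd tl ih =>
    apply ih
    apply PySem.Dict.nodup_keys_insert
    by_cases hc : d.contains (f hd) = true
    · rw [PySem.Dict.setdefault_of_contains d false hc]; exact h
    · rw [PySem.Dict.setdefault_of_not_contains d false (by simpa using hc)]
      exact PySem.Dict.nodup_keys_insert _ _ _ h

theorem nodup_keys_texts_fold (f g : List String → String) (l : List (List String))
    (d : PySem.Dict String Bool) (h : d.keys.Nodup) :
    (l.foldl (fun d t => (d.insert (f t) true).insert (g t) true) d).keys.Nodup := by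
  induction l generalizing d with
  | nil => exact h
  | cons hd tl ih =>
    exact ih _ (PySem.Dict.nodup_keys_insert _ _ _ (PySem.Dict.nodup_keys_insert _ _ _ h))

-- B's filtered item firsts are exactly the keys mapped to false
theorem mem_filtered_keys (d : PySem.Dict String Bool) (hnd : d.keys.Nodup) (x : String) :
    x ∈ (d.items.filter (fun p => !p.2)).map (fun p => p.1) ↔ d.get? x = some false := by
  simp only [List.mem_map, List.mem_filter]
  constructor
  · rintro ⟨⟨k, v⟩, ⟨hm, hv⟩, rfl⟩
    have : v = false := by cases v <;> simp_all
    subst this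
    exact PySem.Dict.get?_of_mem_items d hm hnd
  · intro hx
    exact ⟨(x, false), ⟨PySem.Dict.mem_items_of_get?_eq_some d hx, rfl⟩, rfl⟩

theorem find_possible_telemarketers_eq (calls : List (List String)) (texts : List (List String)) :
    find_possible_telemarketers calls texts = find_possible_telemarketers_alt calls texts := by
  unfold find_possible_telemarketers find_possible_telemarketers_alt
  simp only []
  congr 1
  apply PySem.List.sorted_eq_sorted_of_perm
  · exact fun a b h => h
  · have hnd1 : (calls.foldl (fun d call =>
        (PySem.Dict.setdefault d (PySem.List.pyGetD call 0 "") false).insert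
          (PySem.List.pyGetD call 1 "") true) PySem.Dict.empty).keys.Nodup :=
      nodup_keys_calls_fold _ _ _ _ (by simp)
    have hnd2 := nodup_keys_texts_fold (fun t => PySem.List.pyGetD t 0 "")
      (fun t => PySem.List.pyGetD t 1 "") texts _ hnd1
    rw [List.perm_ext_iff_of_nodup]
    · intro x
      rw [mem_foldl_guard2, mem_foldl_guard1, pool0_eq, mem_filtered_keys _ hnd2,
        get?_texts_fold, get?_calls_fold]
      simp only [PySem.Set.mem_ofList, PySem.Dict.get?_empty, Option.none_or]
      constructor
      · rintro ⟨⟨hx, hcall⟩, htext⟩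
        have h1 : ¬(x ∈ texts.map (fun t => PySem.List.pyGetD t 0 "")
            ∨ x ∈ texts.map (fun t => PySem.List.pyGetD t 1 "")) := by
          rintro (hm | hm) <;> obtain ⟨t, ht, he⟩ := List.mem_map.mp hm
          · exact (htext t ht).1 he.symm
          · exact (htext t ht).2 he.symm
        have h2 : ¬(x ∈ calls.map (fun c => PySem.List.pyGetD c 1 "")) := by
          intro hm; obtain ⟨c, hc, he⟩ := List.mem_map.mp hm
          exact hcall c hc he.symm
        rw [if_neg h1, if_neg h2, if_pos hx]
      · intro hx
        split_ifs at hx with h1 h2 h3 <;>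
          first
          | exact ⟨⟨h3, fun c hc he => h2 (List.mem_map.mpr ⟨c, hc, he.symm⟩)⟩,
              fun t ht => ⟨fun he => h1 (Or.inl (List.mem_map.mpr ⟨t, ht, he.symm⟩)),
                           fun he => h1 (Or.inr (List.mem_map.mpr ⟨t, ht, he.symm⟩))⟩⟩
          | simp at hx
    · exact nodup_foldl_guard2 _ _ _ _ (nodup_foldl_guard1 _ _ _ (by rw [pool0_eq]; exact PySem.Set.nodup_ofList _))
    · have := List.Sublist.map (fun p : String × Bool => p.1)
        (List.filter_sublist (l := (texts.foldl (fun d text =>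
          (d.insert (PySem.List.pyGetD text 0 "") true).insert
            (PySem.List.pyGetD text 1 "") true) (calls.foldl (fun d call =>
          (PySem.Dict.setdefault d (PySem.List.pyGetD call 0 "") false).insert
            (PySem.List.pyGetD call 1 "") true) PySem.Dict.empty)).items)
          (p := fun p => !p.2))
      exact this.nodup hnd2

-- ===== VERDICT (by name: the statement is the Claim_ definition above) =====
theorem find_possible_telemarketers_spec : Claim_equal_find_possible_telemarketers := by
  intro calls texts _ _
  unfold Spec_find_possible_telemarketers
  exact find_possible_telemarketers_eq calls texts
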